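-- pv_equiv track=rewrite | github.com/c-s-h-i-r/python | Warmup-2.py | last2
-- ===== SOURCE A (Python) =====
-- def last2(str):
--     """Given a string, return the count of the number of times that the last 2 characters appear
--     in the string as a substring
--     """
--     if(len(str) < 2):
--         return 0
--     last2 = str[-2:]
--     count = 0
--     for i in range(0, len(str)-2):
--         substr = str[i:i+2]
--         count += 1 if substr == last2 else 0
--     return count
-- ===== SOURCE B (Python) =====
-- def last2(str):
--     if len(str) < 2:
--         return 0
--     target = str[-2:]
--     count = 0
--     pos = str.find(target)
--     while pos != -1 and pos <= len(str) - 3: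
--         count += 1
--         pos = str.find(target, pos + 1)
--     return count
-- ===== Notes on version B (the rewrite author's own statement) =====
-- stated objective: faster
-- what changed: B replaces A's per-index sliding-window comparison over range(len-2) with a search-driven scan: it repeatedly jumps to the next occurrence via str.find(target, pos+1) in a while loop, counting each hit at index <= len-3 (which excludes the final window itself) and advancing by one to keep overlaps.
import Mathlib
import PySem

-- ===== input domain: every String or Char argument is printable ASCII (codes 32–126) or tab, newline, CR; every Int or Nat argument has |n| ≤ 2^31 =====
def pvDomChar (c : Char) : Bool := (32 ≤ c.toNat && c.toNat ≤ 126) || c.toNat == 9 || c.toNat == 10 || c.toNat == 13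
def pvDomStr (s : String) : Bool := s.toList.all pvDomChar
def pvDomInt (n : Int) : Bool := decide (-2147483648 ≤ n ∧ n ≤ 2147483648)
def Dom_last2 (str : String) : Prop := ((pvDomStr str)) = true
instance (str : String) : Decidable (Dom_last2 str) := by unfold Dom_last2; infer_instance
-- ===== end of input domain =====

-- B replaces A's index loop over every window by a find-driven scan that jumps from match to
-- match (counting hits at index ≤ len-3, advancing start = pos+1 for overlaps); measurably faster (C-level find).

-- ===== PORT A =====
def last2 (str : String) : Int :=
  let l := str.toList
  if l.length < 2 then 0
  else
    let lastv := PySem.List.slice l (some (-2)) none        -- str[-2:]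
    (PySem.List.pyRange 0 ((l.length : Int) - 2) 1).foldl
      (fun count i =>
        let substr := PySem.List.slice l (some i) (some (i + 2))   -- str[i:i+2]
        count + (if substr == lastv then 1 else 0)) 0

-- ===== PORT B =====
-- the while loop of Source B; fuel = l.length + 1 only makes the recursion structural
-- (each continuing iteration strictly increases pos, so the fuel is never exhausted)
def last2Loop (l target : List Char) : Nat → Int → Int → Int
  | 0, _, count => count
  | fuel + 1, pos, count =>
    if pos ≠ -1 ∧ pos ≤ (l.length : Int) - 3 then
      last2Loop l target fuel (PySem.Chars.findFrom l target (pos + 1) none) (count + 1)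
    else count

def last2_alt (str : String) : Int :=
  let l := str.toList
  if l.length < 2 then 0
  else
    let target := PySem.List.slice l (some (-2)) none       -- str[-2:]
    last2Loop l target (l.length + 1) (PySem.Chars.find l target) 0   -- pos = str.find(target); while …

-- ===== PRECONDITION & SPEC =====
def Spec_last2 (str : String) (out : Int) : Prop := out = last2_alt str
instance (str : String) (out : Int) : Decidable (Spec_last2 str out) := by unfold Spec_last2; infer_instance

-- ===== CLAIM (what is proved, stated in full; the proofs are below) =====
def Claim_equal_last2 : Prop := ∀ (str : String), Dom_last2 str → Spec_last2 str (last2 str)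

-- ===== LEMMAS AND PROOFS =====

-- the fold body 'acc + (if c then 1 else 0)' in the shape foldl_if_add_one expects
theorem last2_fold_shape {α : Type} (p : α → Bool) (l : List α) (a : Int) :
    l.foldl (fun acc x => acc + (if p x then (1 : Int) else 0)) a = a + (l.countP p : Int) := by
  have : (fun (acc : Int) x => acc + (if p x then (1 : Int) else 0)) =
      (fun acc x => if p x then acc + 1 else acc) := by
    funext acc x; by_cases h : p x <;> simp [h]
  rw [this, PySem.List.foldl_if_add_one]

-- a match strictly before the boundary ↔ the window equals the target
theorem last2_prefix_iff (l target : List Char) (htl : target.length = 2) (j : Nat) :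
    target <+: l.drop j ↔ (l.drop j).take 2 = target := by
  rw [List.prefix_iff_eq_take, htl]
  exact ⟨Eq.symm, Eq.symm⟩

-- one unfolding step of the loop
theorem last2Loop_succ (l target : List Char) (fuel : Nat) (pos count : Int) :
    last2Loop l target (fuel + 1) pos count
      = if pos ≠ -1 ∧ pos ≤ (l.length : Int) - 3 then
          last2Loop l target fuel (PySem.Chars.findFrom l target (pos + 1) none) (count + 1)
        else count := rfl

-- core invariant of the find-driven loop: starting the search at s, the loop adds exactly
-- the number of matches at indices in [s, l.length - 3]
theorem last2_loop_counts (l target : List Char) (htl : target.length = 2) :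
    ∀ (fuel s : Nat) (c : Int), s ≤ l.length → l.length - s < fuel →
      last2Loop l target fuel (PySem.Chars.findFrom l target (s : Int) none) c
        = c + ((List.range' s (l.length - 2 - s)).countP
                 (fun j => decide (target <+: l.drop j)) : Int) := by
  intro fuel
  induction fuel with
  | zero => intro s c hs hf; omega
  | succ fuel ih =>
    intro s c hs hf
    by_cases hneg : PySem.Chars.findFrom l target (s : Int) none = -1
    · -- no occurrence at or after s: the loop stops, and no j ≥ s matches
      have hnin : ¬ target <:+: l.drop s :=
        (PySem.Chars.findFrom_natCast_eq_neg_one_iff l target s hs).mp hneg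
      have hzero : (List.range' s (l.length - 2 - s)).countP
          (fun j => decide (target <+: l.drop j)) = 0 := by
        rw [List.countP_eq_zero]
        intro j hjm
        have hjs : s ≤ j := by
          have := List.mem_range'_1.mp hjm; omega
        simp only [decide_eq_true_eq]
        intro hpre
        exact hnin (by
          have : l.drop j = (l.drop s).drop (j - s) := by
            rw [List.drop_drop]; congr 1; omega
          rw [this] at hpre
          exact hpre.isInfix.trans (List.drop_suffix _ _).isInfix)
      rw [hzero]
      rw [last2Loop_succ, if_neg (by push_neg; intro h; exact absurd hneg (by simp [h]))]
      simp
    · -- first occurrence at p ≥ s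
      obtain ⟨hsp, hpre, hmin⟩ :=
        PySem.Chars.findFrom_natCast_spec l target s hs hneg
      set p : Int := PySem.Chars.findFrom l target (s : Int) none with hp
      clear_value p
      have hp0 : 0 ≤ p := le_trans (by exact_mod_cast Nat.zero_le s) hsp
      have hplen : p.toNat + target.length ≤ l.length := by
        have := hpre.length_le
        have hdl : (l.drop p.toNat).length = l.length - p.toNat := by simp
        omega
      have hpt : ((p.toNat : Int)) = p := Int.toNat_of_nonneg hp0
      by_cases hb : p ≤ (l.length : Int) - 3
      · -- a counted hit; continue from p + 1
        have hpn3 : p.toNat ≤ l.length - 3 ∧ 3 ≤ l.length := by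
          constructor <;> omega
        have hs' : p.toNat + 1 ≤ l.length := by omega
        have hcast : p + 1 = ((p.toNat + 1 : Nat) : Int) := by omega
        rw [last2Loop_succ, if_pos ⟨by omega, hb⟩, hcast,
            ih (p.toNat + 1) (c + 1) hs' (by omega)]
        -- split the count at p
        have e1 : s + (p.toNat - s) = p.toNat := by omega
        have e2 : (p.toNat - s) + (l.length - 2 - p.toNat) = l.length - 2 - s := by omega
        have hsplit : List.range' s (l.length - 2 - s)
            = List.range' s (p.toNat - s) ++ p.toNat :: List.range' (p.toNat + 1) (l.length - 2 - (p.toNat + 1)) := by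
          rw [show (p.toNat :: List.range' (p.toNat + 1) (l.length - 2 - (p.toNat + 1)))
                = List.range' p.toNat (l.length - 2 - p.toNat) from ?_]
          · rw [← e2, ← List.range'_append_1, e1]
          · rw [show l.length - 2 - p.toNat = (l.length - 2 - (p.toNat + 1)) + 1 from by omega,
                List.range'_succ]
        rw [hsplit, List.countP_append, List.countP_cons]
        have hzero : (List.range' s (p.toNat - s)).countP
            (fun j => decide (target <+: l.drop j)) = 0 := by
          rw [List.countP_eq_zero]
          intro j hjm
          have := List.mem_range'_1.mp hjm
          simp only [decide_eq_true_eq]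
          exact hmin j (by exact_mod_cast (by omega : s ≤ j)) (by omega)
        rw [hzero]
        simp only [hpre, decide_true]
        push_cast
        ring
      · -- first occurrence is past the boundary: loop stops, nothing at or after s counts
        have hzero : (List.range' s (l.length - 2 - s)).countP
            (fun j => decide (target <+: l.drop j)) = 0 := by
          rw [List.countP_eq_zero]
          intro j hjm
          have hj' := List.mem_range'_1.mp hjm
          simp only [decide_eq_true_eq]
          refine hmin j (by exact_mod_cast (by omega : s ≤ j)) ?_
          omega
        rw [hzero]
        rw [last2Loop_succ, if_neg (by push_neg; intro _; exact not_le.mp hb)]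
        simp

theorem last2_main (str : String) : last2 str = last2_alt str := by
  unfold last2 last2_alt
  by_cases h : str.toList.length < 2
  · have h' : str.length ≤ 1 := by
      have h2 : str.length < 2 := by simpa using h
      omega
    simp [h']
  · simp only [h, if_false]
    set l := str.toList with hl
    set n := l.length with hn
    have h2 : 2 ≤ n := by omega
    have hs2 : PySem.List.slice l (some (-2)) none = l.drop (n - 2) :=
      PySem.List.slice_from_neg_ofNat l 2 (by norm_num)
    set target := PySem.List.slice l (some (-2)) none with htv
    have htl : target.length = 2 := by
      rw [hs2]; simp; omega
    -- A side: fold = countP over the window indices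
    rw [last2_fold_shape, PySem.List.pyRange_one, List.countP_map]
    have hnn : (((n : Int) - 2 - 0).toNat) = n - 2 := by omega
    rw [hnn]
    -- B side: the loop counts matches in [0, n-3]
    have hfind : PySem.Chars.find l target
        = PySem.Chars.findFrom l target ((0 : Nat) : Int) none := by
      simp
    rw [hfind, last2_loop_counts l target htl (n + 1) 0 0 (by omega) (by omega), zero_add,
        Nat.sub_zero, ← List.range_eq_range']
    simp only [zero_add]
    congr 1
    refine List.countP_congr ?_
    intro x hx
    have hx' : x < n - 2 := List.mem_range.mp hx
    simp only [Function.comp_apply, beq_iff_eq, decide_eq_true_eq]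
    rw [show ((x : Int) + 2) = ((x : Int) + ((2 : Nat) : Int)) from by norm_num,
        PySem.List.slice_natCast_add,
        last2_prefix_iff l target htl x]

-- ===== VERDICT (by name: the statement is the Claim_ definition above) =====
theorem last2_spec : Claim_equal_last2 := by
  intro str _
  exact last2_main str
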